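-- pv_equiv track=rewrite | github.com/McQuaidRobotics/ScoutingPASS | scripts/BetterCSVParser.py | calcAmpedVsUnampedClosest
-- ===== SOURCE A (Python) =====
-- def calcAmpedVsUnampedClosest(totalCycles: int, speakerScore: int, climbing: int) -> tuple[int, list[int]]:
--     minDiff: int = 1e16
--     res: list[int] = []
--
--     for harmony in range(climbing + 1):
--         harmony_points = 0 if harmony == 0 else (harmony - 1) * 2
--
--         for unamped in range(totalCycles + 1):
--             amped = totalCycles - unamped
--             diff = abs(speakerScore - (unamped * 2 + amped * 5 + harmony_points))
--             if(diff < minDiff):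
--                 minDiff = diff
--                 res = [unamped * 2, amped * 5, harmony_points]
--
--     return res
-- ===== SOURCE B (Python) =====
-- def calcAmpedVsUnampedClosest(totalCycles: int, speakerScore: int, climbing: int) -> list[int]:
--     # For each harmony, the per-cycle score is 2*unamped + 5*amped + hp
--     # = 5*totalCycles - 3*unamped + hp, so the best unamped minimizes
--     # |3*unamped - c| with c = 5*totalCycles + hp - speakerScore; solve it directly.
--     if totalCycles < 0:
--         return []
--     minDiff = None
--     res = []
--     for harmony in range(climbing + 1):
--         hp = 0 if harmony == 0 else (harmony - 1) * 2
--         c = 5 * totalCycles + hp - speakerScore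
--         if c <= 0:
--             u = 0
--         elif c >= 3 * totalCycles:
--             u = totalCycles
--         else:
--             q, r = divmod(c, 3)
--             u = q + 1 if r == 2 else q
--         d = abs(3 * u - c)
--         if minDiff is None or d < minDiff:
--             minDiff = d
--             res = [2 * u, 5 * (totalCycles - u), hp]
--     return res
-- ===== Notes on version B (the rewrite author's own statement) =====
-- stated objective: faster
-- what changed: The inner scan over all unamped splits is replaced by solving |3*unamped - c| analytically (clamped floor division) per harmony, giving O(1) work per harmony instead of O(totalCycles).
import Mathlib
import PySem

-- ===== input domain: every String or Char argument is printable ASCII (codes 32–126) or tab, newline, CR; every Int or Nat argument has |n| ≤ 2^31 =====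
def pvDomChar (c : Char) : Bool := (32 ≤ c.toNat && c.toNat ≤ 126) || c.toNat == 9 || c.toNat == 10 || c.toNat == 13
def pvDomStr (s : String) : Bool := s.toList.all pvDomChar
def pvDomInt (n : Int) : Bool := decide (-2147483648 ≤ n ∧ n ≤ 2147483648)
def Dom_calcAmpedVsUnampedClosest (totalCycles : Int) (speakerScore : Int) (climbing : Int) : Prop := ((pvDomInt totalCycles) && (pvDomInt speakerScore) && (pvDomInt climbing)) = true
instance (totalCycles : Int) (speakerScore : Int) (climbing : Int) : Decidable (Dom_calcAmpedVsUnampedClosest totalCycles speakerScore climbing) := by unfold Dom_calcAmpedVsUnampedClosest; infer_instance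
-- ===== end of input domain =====

-- B replaces A's inner scan over all unamped splits by an O(1) analytic solution per harmony (asymptotically faster).
-- A's float sentinel 1e16 is modelled as the integer 10^16, exact for every diff reachable inside Dom.

-- ===== PORT A =====
def innerA (totalCycles speakerScore harmony_points : Int) (st : Int × List Int) : Int × List Int :=
  (PySem.List.pyRange 0 (totalCycles + 1) 1).foldl
    (fun st unamped =>
      let amped := totalCycles - unamped
      let diff := |speakerScore - (unamped * 2 + amped * 5 + harmony_points)|
      if diff < st.1 then (diff, [unamped * 2, amped * 5, harmony_points]) else st) st

def calcAmpedVsUnampedClosest (totalCycles : Int) (speakerScore : Int) (climbing : Int) : List Int :=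
  ((PySem.List.pyRange 0 (climbing + 1) 1).foldl
    (fun st harmony =>
      let harmony_points := if harmony = 0 then 0 else (harmony - 1) * 2
      innerA totalCycles speakerScore harmony_points st)
    ((10 ^ 16 : Int), ([] : List Int))).2

-- ===== PORT B =====
def bestU (totalCycles c : Int) : Int :=
  if c ≤ 0 then 0
  else if 3 * totalCycles ≤ c then totalCycles
  else
    let q := PySem.Int.floordiv c 3
    let r := PySem.Int.mod c 3
    if r = 2 then q + 1 else q

def stepB (totalCycles speakerScore : Int) (st : Option Int × List Int) (harmony : Int) :
    Option Int × List Int :=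
  let hp := if harmony = 0 then 0 else (harmony - 1) * 2
  let c := 5 * totalCycles + hp - speakerScore
  let u := bestU totalCycles c
  let d := |3 * u - c|
  match st.1 with
  | none => (some d, [2 * u, 5 * (totalCycles - u), hp])
  | some md => if d < md then (some d, [2 * u, 5 * (totalCycles - u), hp]) else st

def calcAmpedVsUnampedClosest_alt (totalCycles : Int) (speakerScore : Int) (climbing : Int) : List Int :=
  if totalCycles < 0 then []
  else ((PySem.List.pyRange 0 (climbing + 1) 1).foldl (stepB totalCycles speakerScore)
    (none, ([] : List Int))).2

-- ===== PRECONDITION & SPEC =====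
def Spec_calcAmpedVsUnampedClosest (totalCycles : Int) (speakerScore : Int) (climbing : Int) (out : List Int) : Prop := out = calcAmpedVsUnampedClosest_alt totalCycles speakerScore climbing
instance (totalCycles : Int) (speakerScore : Int) (climbing : Int) (out : List Int) : Decidable (Spec_calcAmpedVsUnampedClosest totalCycles speakerScore climbing out) := by unfold Spec_calcAmpedVsUnampedClosest; infer_instance

-- ===== CLAIM (what is proved, stated in full; the proofs are below) =====
def Claim_equal_calcAmpedVsUnampedClosest : Prop := ∀ (totalCycles : Int) (speakerScore : Int) (climbing : Int), Dom_calcAmpedVsUnampedClosest totalCycles speakerScore climbing → Spec_calcAmpedVsUnampedClosest totalCycles speakerScore climbing (calcAmpedVsUnampedClosest totalCycles speakerScore climbing)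

-- ===== LEMMAS AND PROOFS =====

-- d for harmony h (proof helper; mirrors the values both steps compute)
def dOf (T s h : Int) : Int :=
  let hp := if h = 0 then 0 else (h - 1) * 2
  let c := 5 * T + hp - s
  |3 * bestU T c - c|

-- a strict-improvement scan over values all ≥ the current minimum changes nothing
theorem scan_none {α : Type} (f : Int → Int) (g : Int → α) (L : List Int) (md : Int) (res : α)
    (h : ∀ u ∈ L, md ≤ f u) :
    L.foldl (fun st u => if f u < st.1 then (f u, g u) else st) (md, res) = (md, res) := by
  induction L with
  | nil => rfl
  | cons a t ih =>
    simp only [List.foldl_cons]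
    rw [if_neg (not_lt.mpr (h a (List.mem_cons_self)))]
    exact ih (fun u hu => h u (List.mem_cons_of_mem _ hu))

-- a strict-improvement scan over a list with a unique strict minimizer
theorem scan_min {α : Type} (f : Int → Int) (g : Int → α) (L : List Int) (ustar : Int)
    (hnd : L.Nodup) (hmem : ustar ∈ L) (hmin : ∀ u ∈ L, u ≠ ustar → f ustar < f u)
    (md : Int) (res : α) :
    L.foldl (fun st u => if f u < st.1 then (f u, g u) else st) (md, res)
      = if f ustar < md then (f ustar, g ustar) else (md, res) := by
  induction L generalizing md res with
  | nil => cases hmem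
  | cons a t ih =>
    have hnd' := List.nodup_cons.mp hnd
    rcases List.mem_cons.mp hmem with h | h
    · subst h
      simp only [List.foldl_cons]
      by_cases hlt : f ustar < md
      · rw [if_pos hlt]
        apply scan_none
        intro u hu
        have hne : u ≠ ustar := fun he => hnd'.1 (he ▸ hu)
        exact le_of_lt (hmin u (List.mem_cons_of_mem _ hu) hne)
      · rw [if_neg hlt]
        apply scan_none
        intro u hu
        have hne : u ≠ ustar := fun he => hnd'.1 (he ▸ hu)
        exact le_trans (not_lt.mp hlt) (le_of_lt (hmin u (List.mem_cons_of_mem _ hu) hne))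
    · have hne : a ≠ ustar := fun he => hnd'.1 (he ▸ h)
      have hfa : f ustar < f a := hmin a (List.mem_cons_self) hne
      have ih' := ih hnd'.2 h (fun u hu hu' => hmin u (List.mem_cons_of_mem _ hu) hu')
      simp only [List.foldl_cons]
      by_cases hlt : f a < md
      · rw [if_pos hlt, ih', if_pos hfa, if_pos (lt_trans hfa hlt)]
      · rw [if_neg hlt, ih']

theorem diff_eq (T s hp u : Int) :
    |s - (u * 2 + (T - u) * 5 + hp)| = |3 * u - (5 * T + hp - s)| := by
  have h : s - (u * 2 + (T - u) * 5 + hp) = 3 * u - (5 * T + hp - s) := by ring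
  rw [h]

theorem bestU_bounds (T c : Int) (hT : 0 ≤ T) : 0 ≤ bestU T c ∧ bestU T c ≤ T := by
  simp only [bestU]
  rw [PySem.Int.floordiv_eq_ediv_of_pos (by norm_num : (0:Int) < 3)]
  split_ifs with h1 h2 h3 <;> constructor <;> omega

theorem bestU_min (T c : Int) :
    ∀ u, 0 ≤ u → u ≤ T → u ≠ bestU T c → |3 * bestU T c - c| < |3 * u - c| := by
  intro u hu0 huT hne
  simp only [bestU] at hne ⊢
  rw [PySem.Int.floordiv_eq_ediv_of_pos (by norm_num : (0:Int) < 3),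
      PySem.Int.mod_eq_emod_of_pos (by norm_num : (0:Int) < 3)] at hne ⊢
  split_ifs at hne ⊢ with h1 h2 h3 <;>
    simp only [Int.abs_eq_natAbs] <;> omega

theorem innerA_eq (T s hp : Int) (hT : 0 ≤ T) (md : Int) (res : List Int) :
    innerA T s hp (md, res)
      = if |3 * bestU T (5 * T + hp - s) - (5 * T + hp - s)| < md
        then (|3 * bestU T (5 * T + hp - s) - (5 * T + hp - s)|,
              [bestU T (5 * T + hp - s) * 2, (T - bestU T (5 * T + hp - s)) * 5, hp])
        else (md, res) := by
  have hb := bestU_bounds T (5 * T + hp - s) hT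
  have h1 : innerA T s hp (md, res)
      = if |s - (bestU T (5 * T + hp - s) * 2 + (T - bestU T (5 * T + hp - s)) * 5 + hp)| < md
        then (|s - (bestU T (5 * T + hp - s) * 2 + (T - bestU T (5 * T + hp - s)) * 5 + hp)|,
              [bestU T (5 * T + hp - s) * 2, (T - bestU T (5 * T + hp - s)) * 5, hp])
        else (md, res) :=
    scan_min (f := fun u => |s - (u * 2 + (T - u) * 5 + hp)|)
      (g := fun u => [u * 2, (T - u) * 5, hp])
      (PySem.List.pyRange 0 (T + 1) 1) (bestU T (5 * T + hp - s))
      (PySem.List.nodup_pyRange_one 0 (T + 1))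
      ((PySem.List.mem_pyRange_one).mpr ⟨hb.1, by omega⟩)
      (fun u hu hne => by
        have hm := (PySem.List.mem_pyRange_one).mp hu
        dsimp only
        rw [diff_eq, diff_eq]
        exact bestU_min T (5 * T + hp - s) u hm.1 (by omega) hne)
      md res
  rw [h1, diff_eq]

theorem dOf_small (T s h : Int) (hT : 0 ≤ T) (hTb : T ≤ 2 ^ 31)
    (hs1 : -2 ^ 31 ≤ s) (hs2 : s ≤ 2 ^ 31) (hh : 0 ≤ h) (hhb : h ≤ 2 ^ 31) :
    dOf T s h < 10 ^ 16 := by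
  unfold dOf
  have hhp : (0 : Int) ≤ (if h = 0 then 0 else (h - 1) * 2)
      ∧ (if h = 0 then 0 else (h - 1) * 2) ≤ 2 ^ 32 := by
    split_ifs <;> constructor <;> omega
  have hb := bestU_bounds T (5 * T + (if h = 0 then 0 else (h - 1) * 2) - s) hT
  simp only [Int.abs_eq_natAbs]
  omega

theorem fold_rel (T s : Int) (hT : 0 ≤ T) (L : List Int)
    (hL : ∀ h ∈ L, dOf T s h < 10 ^ 16) :
    ∀ (mdA : Int) (ob : Option Int) (res : List Int),
      ((ob = none ∧ mdA = 10 ^ 16) ∨ ∃ m, ob = some m ∧ mdA = m ∧ m < 10 ^ 16) →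
      (L.foldl (fun st harmony =>
          let harmony_points := if harmony = 0 then 0 else (harmony - 1) * 2
          innerA T s harmony_points st) (mdA, res)).2
        = (L.foldl (stepB T s) (ob, res)).2 := by
  induction L with
  | nil =>
    intro mdA ob res _; rfl
  | cons h t ih =>
    intro mdA ob res hrel
    have hd := hL h (List.mem_cons_self)
    have ht : ∀ x ∈ t, dOf T s x < 10 ^ 16 := fun x hx => hL x (List.mem_cons_of_mem _ hx)
    simp only [List.foldl_cons]
    have hAstep := innerA_eq T s (if h = 0 then 0 else (h - 1) * 2) hT mdA res
    have hlist : [bestU T (5 * T + (if h = 0 then 0 else (h - 1) * 2) - s) * 2,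
        (T - bestU T (5 * T + (if h = 0 then 0 else (h - 1) * 2) - s)) * 5,
        (if h = 0 then 0 else (h - 1) * 2)]
        = [2 * bestU T (5 * T + (if h = 0 then 0 else (h - 1) * 2) - s),
        5 * (T - bestU T (5 * T + (if h = 0 then 0 else (h - 1) * 2) - s)),
        (if h = 0 then 0 else (h - 1) * 2)] := by
      rw [mul_comm, mul_comm (T - _) 5]
    unfold dOf at hd
    rcases hrel with ⟨hob, hmd⟩ | ⟨m, hob, hmd, hm⟩
    · subst hmd
      rw [hAstep, if_pos hd, hlist]
      have hB : stepB T s (ob, res) h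
          = (some (|3 * bestU T (5 * T + (if h = 0 then 0 else (h - 1) * 2) - s)
                - (5 * T + (if h = 0 then 0 else (h - 1) * 2) - s)|),
             [2 * bestU T (5 * T + (if h = 0 then 0 else (h - 1) * 2) - s),
              5 * (T - bestU T (5 * T + (if h = 0 then 0 else (h - 1) * 2) - s)),
              (if h = 0 then 0 else (h - 1) * 2)]) := by
        simp only [stepB, hob]
      rw [hB]
      exact ih ht _ _ _ (Or.inr ⟨_, rfl, rfl, hd⟩)
    · subst hmd
      rw [hAstep, hlist]
      by_cases hlt : |3 * bestU T (5 * T + (if h = 0 then 0 else (h - 1) * 2) - s)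
          - (5 * T + (if h = 0 then 0 else (h - 1) * 2) - s)| < mdA
      · rw [if_pos hlt]
        have hB : stepB T s (ob, res) h
            = (some (|3 * bestU T (5 * T + (if h = 0 then 0 else (h - 1) * 2) - s)
                  - (5 * T + (if h = 0 then 0 else (h - 1) * 2) - s)|),
               [2 * bestU T (5 * T + (if h = 0 then 0 else (h - 1) * 2) - s),
                5 * (T - bestU T (5 * T + (if h = 0 then 0 else (h - 1) * 2) - s)),
                (if h = 0 then 0 else (h - 1) * 2)]) := by
          simp only [stepB, hob, if_pos hlt]
        rw [hB]
        exact ih ht _ _ _ (Or.inr ⟨_, rfl, rfl, lt_trans hlt hm⟩)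
      · rw [if_neg hlt]
        have hB : stepB T s (ob, res) h = (ob, res) := by
          simp only [stepB, hob, if_neg hlt]
        rw [hB, hob]
        exact ih ht _ _ _ (Or.inr ⟨_, rfl, rfl, hm⟩)

theorem foldl_inner_id (T s : Int) (hT : T < 0) (L : List Int) (st : Int × List Int) :
    L.foldl (fun st harmony =>
        let harmony_points := if harmony = 0 then 0 else (harmony - 1) * 2
        innerA T s harmony_points st) st = st := by
  induction L generalizing st with
  | nil => rfl
  | cons a t ih =>
    simp only [List.foldl_cons]
    have : innerA T s (if a = 0 then 0 else (a - 1) * 2) st = st := by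
      unfold innerA
      rw [PySem.List.pyRange_one_eq_nil (by omega)]
      rfl
    rw [this, ih]

-- ===== VERDICT (by name: the statement is the Claim_ definition above) =====
theorem calcAmpedVsUnampedClosest_spec : Claim_equal_calcAmpedVsUnampedClosest := by
  intro T s cl hDom
  unfold Spec_calcAmpedVsUnampedClosest calcAmpedVsUnampedClosest calcAmpedVsUnampedClosest_alt
  have hDom' : -2147483648 ≤ T ∧ T ≤ 2147483648 ∧ -2147483648 ≤ s ∧ s ≤ 2147483648
      ∧ -2147483648 ≤ cl ∧ cl ≤ 2147483648 := by
    unfold Dom_calcAmpedVsUnampedClosest pvDomInt at hDom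
    simp only [Bool.and_eq_true, decide_eq_true_eq] at hDom
    exact ⟨hDom.1.1.1, hDom.1.1.2, hDom.1.2.1, hDom.1.2.2, hDom.2.1, hDom.2.2⟩
  by_cases hT : T < 0
  · rw [if_pos hT, foldl_inner_id T s hT]
  · rw [if_neg hT]
    exact fold_rel T s (by omega) _
      (fun h hh => by
        have hm := (PySem.List.mem_pyRange_one).mp hh
        exact dOf_small T s h (by omega) (by omega) (by omega) (by omega) hm.1 (by omega))
      _ _ _ (Or.inl ⟨rfl, rfl⟩)
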